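-- pv_equiv track=rewrite | github.com/yarkoslav/skyscrapers | puzzle.py | first_property
-- ===== SOURCE A (Python) =====
-- def first_property(board: list) -> bool:
--     """
--     This functions checks first property of board(are the same digits in row)
--
--     >>> first_property(["**** ****","***1 ****","**  3****","* 4 1****","     9 5 ",\
-- " 6  83  *","3   1  **","  8  2***","  2  ****"])
--     True
--     """
--     res = True
--     for row in board:
--         same_row = set()
--         for square in row:
--             if square.isdigit() and square in same_row:
--                 res = False
--             else:
--                 same_row.add(square)
--     return res
-- ===== SOURCE B (Python) =====
-- def first_property(board: list) -> bool:
--     for row in board: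
--         digits = sorted(c for c in row if c.isdigit())
--         for x, y in zip(digits, digits[1:]):
--             if x == y:
--                 return False
--     return True
-- ===== Notes on version B (the rewrite author's own statement) =====
-- stated objective: simpler
-- what changed: Replaces the never-breaking per-character set-membership flag loop with per-row sort of the digit characters followed by an adjacent-equality scan with early return.
import Mathlib
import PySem

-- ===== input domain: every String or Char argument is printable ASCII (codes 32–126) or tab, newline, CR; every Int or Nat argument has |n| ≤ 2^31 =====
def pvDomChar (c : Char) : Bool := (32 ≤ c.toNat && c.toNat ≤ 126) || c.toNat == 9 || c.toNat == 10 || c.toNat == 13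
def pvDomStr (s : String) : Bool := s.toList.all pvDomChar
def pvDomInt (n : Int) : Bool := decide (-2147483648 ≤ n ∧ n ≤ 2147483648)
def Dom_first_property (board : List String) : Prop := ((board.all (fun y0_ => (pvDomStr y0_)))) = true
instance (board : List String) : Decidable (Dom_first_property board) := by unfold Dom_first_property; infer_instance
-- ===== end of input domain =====

-- B replaces the flag-and-set scan with a per-row sort of the digit characters and an
-- adjacent-equality scan (objective: simpler).

-- ===== PORT A =====
-- inner loop body: 'if square.isdigit() and square in same_row: res = False else: same_row.add(square)'
def pvInnerStep (st : Bool × PySem.Set Char) (c : Char) : Bool × PySem.Set Char :=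
  if PySem.Chars.isdigit c && PySem.Set.contains st.2 c then (false, st.2)
  else (st.1, PySem.Set.add st.2 c)

def first_property (board : List String) : Bool :=
  board.foldl (fun res row =>
    (row.toList.foldl pvInnerStep (res, (PySem.Set.empty : PySem.Set Char))).1) true

-- ===== PORT B =====
-- 'for x, y in zip(digits, digits[1:]): if x == y: return False'
def pvAdjDup : List Char → Bool
  | a :: b :: t => if a == b then true else pvAdjDup (b :: t)
  | _ => false

def first_property_alt : List String → Bool
  | [] => true
  | row :: rest =>
    if pvAdjDup (PySem.List.sorted (row.toList.filter PySem.Chars.isdigit) (fun x => x) false)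
    then false
    else first_property_alt rest

-- ===== PRECONDITION & SPEC =====
def Spec_first_property (board : List String) (out : Bool) : Prop := out = first_property_alt board
instance (board : List String) (out : Bool) : Decidable (Spec_first_property board out) := by unfold Spec_first_property; infer_instance

-- ===== CLAIM (what is proved, stated in full; the proofs are below) =====
def Claim_equal_first_property : Prop := ∀ (board : List String), Dom_first_property board → Spec_first_property board (first_property board)

-- ===== LEMMAS AND PROOFS =====

-- "this row's digit characters have a duplicate, given the chars already seen in s"
def pvDupFrom (s : PySem.Set Char) : List Char → Bool
  | [] => false
  | c :: t =>
    if PySem.Chars.isdigit c && PySem.Set.contains s c then true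
    else pvDupFrom (PySem.Set.add s c) t

theorem pvInner_false (l : List Char) (s : PySem.Set Char) :
    (l.foldl pvInnerStep (false, s)).1 = false := by
  induction l generalizing s with
  | nil => rfl
  | cons c t ih =>
    simp only [List.foldl, pvInnerStep]
    split <;> exact ih _

theorem pvInner_true (l : List Char) (s : PySem.Set Char) :
    (l.foldl pvInnerStep (true, s)).1 = !pvDupFrom s l := by
  induction l generalizing s with
  | nil => rfl
  | cons c t ih =>
    simp only [List.foldl, pvInnerStep, pvDupFrom]
    by_cases h : (PySem.Chars.isdigit c && PySem.Set.contains s c) = true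
    · simp only [h, if_pos, Bool.not_true]
      exact pvInner_false t s
    · simp only [h, if_neg]
      exact ih _

theorem pvDupFrom_false_iff (l : List Char) (s : PySem.Set Char) :
    pvDupFrom s l = false ↔
      ((l.filter PySem.Chars.isdigit).Nodup ∧
        ∀ c ∈ l.filter PySem.Chars.isdigit, c ∉ s) := by
  induction l generalizing s with
  | nil => simp [pvDupFrom]
  | cons c t ih =>
    simp only [pvDupFrom]
    by_cases hd : PySem.Chars.isdigit c = true
    · by_cases hm : c ∈ s
      · have hc : PySem.Set.contains s c = true := by
          simpa [PySem.Set.contains] using hm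
        simp only [hd, hc, Bool.and_self, if_pos]
        constructor
        · intro h; cases h
        · rintro ⟨-, hall⟩
          exact absurd hm (hall c (by simp [List.mem_filter, hd]))
      · have hc : PySem.Set.contains s c = false := by
          simpa [PySem.Set.contains] using hm
        simp only [hd, hc, Bool.and_false, if_neg, Bool.false_eq_true, not_false_iff]
        rw [ih]
        simp only [List.filter_cons, hd, if_pos, List.nodup_cons, List.mem_cons]
        constructor
        · rintro ⟨hn, hall⟩
          refine ⟨⟨?_, hn⟩, ?_⟩
          · intro hc'
            have := hall c hc'
            rw [PySem.Set.mem_add] at this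
            exact this (Or.inr rfl)
          · rintro x (rfl | hx)
            · exact hm
            · intro hxs
              exact hall x hx ((PySem.Set.mem_add s c x).2 (Or.inl hxs))
        · rintro ⟨⟨hcn, hn⟩, hall⟩
          refine ⟨hn, ?_⟩
          intro x hx hxadd
          rcases (PySem.Set.mem_add s c x).1 hxadd with hxs | rfl
          · exact hall x (Or.inr hx) hxs
          · exact hcn hx
    · simp only [Bool.not_eq_true] at hd
      simp only [hd, Bool.false_and, if_neg, Bool.false_eq_true, not_false_iff]
      rw [ih]
      have hf : (c :: t).filter PySem.Chars.isdigit = t.filter PySem.Chars.isdigit := by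
        simp [hd]
      rw [hf]
      constructor
      · rintro ⟨hn, hall⟩
        refine ⟨hn, ?_⟩
        intro x hx hxs
        exact hall x hx ((PySem.Set.mem_add s c x).2 (Or.inl hxs))
      · rintro ⟨hn, hall⟩
        refine ⟨hn, ?_⟩
        intro x hx hxadd
        rcases (PySem.Set.mem_add s c x).1 hxadd with hxs | rfl
        · exact hall x hx hxs
        · have : PySem.Chars.isdigit x = true := List.of_mem_filter hx
          rw [this] at hd; cases hd

theorem pvAdjDup_false_iff (l : List Char) :
    pvAdjDup l = false ↔ l.IsChain (· ≠ ·) := by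
  induction l with
  | nil => simp [pvAdjDup]
  | cons a t ih =>
    cases t with
    | nil => simp [pvAdjDup, List.IsChain.singleton]
    | cons b t' =>
      simp only [pvAdjDup]
      by_cases h : a = b
      · simp [h, List.isChain_cons_cons]
      · simp only [beq_iff_eq, h, if_neg, if_false]
        rw [ih, List.isChain_cons_cons]
        simp [h]

theorem pvChain_ne_of_nodup {l : List Char} (hs : l.Pairwise (· ≤ ·)) (hn : l.Nodup) :
    l.IsChain (· ≠ ·) := by
  have hlt : l.Pairwise (· < ·) := by
    have := hs.and hn
    exact this.imp (fun h => lt_of_le_of_ne h.1 h.2)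
  exact hlt.isChain.imp (fun _ _ hab => ne_of_lt hab)

theorem pvNodup_of_chain_ne {l : List Char} (hs : l.Pairwise (· ≤ ·)) (hc : l.IsChain (· ≠ ·)) :
    l.Nodup := by
  have key : ∀ (m : List Char), m.Pairwise (· ≤ ·) → m.IsChain (· ≠ ·) → m.IsChain (· < ·) := by
    intro m
    induction m with
    | nil => intro _ _; exact List.isChain_nil
    | cons a t ih =>
      intro hs hc
      cases t with
      | nil => exact List.isChain_singleton a
      | cons b t' =>
        rw [List.isChain_cons_cons] at hc ⊢
        rw [List.pairwise_cons] at hs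
        have hab : a ≤ b := hs.1 b (by simp)
        exact ⟨lt_of_le_of_ne hab hc.1, ih hs.2 hc.2⟩
  have : l.Pairwise (· < ·) := List.isChain_iff_pairwise.1 (key l hs hc)
  exact this.imp ne_of_lt

-- each row passes B's test iff its digit characters are pairwise distinct
theorem pvRow_alt (row : String) :
    (pvAdjDup (PySem.List.sorted (row.toList.filter PySem.Chars.isdigit) (fun x => x) false)
      = false) ↔ (row.toList.filter PySem.Chars.isdigit).Nodup := by
  have hperm : (PySem.List.sorted (row.toList.filter PySem.Chars.isdigit) (fun x => x) false).Perm
      (row.toList.filter PySem.Chars.isdigit) := PySem.List.sorted_perm ..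
  have hpw : (PySem.List.sorted (row.toList.filter PySem.Chars.isdigit) (fun x => x) false).Pairwise
      (fun a b => (fun x => x) a ≤ (fun x => x) b) := PySem.List.sorted_pairwise ..
  rw [pvAdjDup_false_iff]
  constructor
  · intro hc
    exact hperm.nodup_iff.1 (pvNodup_of_chain_ne hpw hc)
  · intro hn
    exact pvChain_ne_of_nodup hpw (hperm.nodup_iff.2 hn)

theorem pvA_foldl (board : List String) (res : Bool) :
    board.foldl (fun res row =>
        (row.toList.foldl pvInnerStep (res, (PySem.Set.empty : PySem.Set Char))).1) res
      = (res && board.all (fun row => !pvDupFrom PySem.Set.empty row.toList)) := by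
  induction board generalizing res with
  | nil => simp
  | cons row rest ih =>
    simp only [List.foldl, List.all_cons]
    cases res with
    | false => rw [pvInner_false, ih]; simp
    | true => rw [pvInner_true, ih]; simp

theorem pvB_all (board : List String) :
    first_property_alt board
      = board.all (fun row =>
          !pvAdjDup (PySem.List.sorted (row.toList.filter PySem.Chars.isdigit) (fun x => x) false)) := by
  induction board with
  | nil => rfl
  | cons row rest ih =>
    simp only [first_property_alt, List.all_cons]
    by_cases h : pvAdjDup (PySem.List.sorted (row.toList.filter PySem.Chars.isdigit) (fun x => x) false) = true
    · simp [h]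
    · simp only [Bool.not_eq_true] at h
      simp [h, ih]

theorem pvRow_agree (row : String) :
    (!pvDupFrom PySem.Set.empty row.toList)
      = (!pvAdjDup (PySem.List.sorted (row.toList.filter PySem.Chars.isdigit) (fun x => x) false)) := by
  have hA : pvDupFrom PySem.Set.empty row.toList = false ↔
      (row.toList.filter PySem.Chars.isdigit).Nodup := by
    rw [pvDupFrom_false_iff]
    simp [PySem.Set.empty]
  have hB := pvRow_alt row
  cases h1 : pvDupFrom PySem.Set.empty row.toList <;>
    cases h2 : pvAdjDup (PySem.List.sorted (row.toList.filter PySem.Chars.isdigit) (fun x => x) false) <;>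
      simp_all

-- ===== VERDICT (by name: the statement is the Claim_ definition above) =====
theorem first_property_spec : Claim_equal_first_property := by
  intro board _
  unfold Spec_first_property first_property
  rw [pvA_foldl, pvB_all]
  simp only [Bool.true_and]
  congr 1
  funext row
  exact pvRow_agree row
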